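-- pv_equiv track=rewrite | github.com/sanbuddhacharyas/Ads_for_flipkart_generator | utils/obj_detection.py | get_hsv_tag
-- ===== SOURCE A (Python) =====
-- H_range = {'H1': (0, 10), 'H2': (10, 20), 'H3': (20, 30), 'H4': (30, 40), 'H5': (40, 50), 'H6': (50, 60),
--                'H7': (60, 70), 'H8': (70, 80), 'H9': (80, 90), 'H10': (90, 100), 'H11': (100, 110), 'H12': (110, 120),
--                'H13': (120, 130), 'H14': (130, 140), 'H15': (140, 150), 'H16': (150, 160), 'H17': (160, 170),
--                'H18': (170, 180)}
--
-- S_range = {'S1': (0, 15), 'S2': (15, 32), 'S3': (32, 45), 'S4': (45, 70), 'S5': (70, 91), 'S6': (91, 116),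
--                'S7': (116, 128), 'S8': (128, 162), 'S9': (162, 188), 'S10': (188, 206), 'S11': (206, 230),
--                'S12': (230, 256)}
--
-- V_range = {'V1': (0, 25), 'V2': (25, 52), 'V3': (52, 75), 'V4': (75, 101), 'V5': (101, 131), 'V6': (131, 167),
--                'V7': (167, 206), 'V8': (206, 256)}
--
-- def get_hsv_tag(h,s,v):
--     hsv_tag = []
--     for h_name, h_range in H_range.items():
--         if h in range(h_range[0], h_range[1]):
--             hsv_tag.append(h_name)
--             break
--     for s_name, s_range in S_range.items():
--         if s in range(s_range[0], s_range[1]):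
--             hsv_tag.append(s_name)
--             break
--     for v_name, v_range in V_range.items():
--         if v in range(v_range[0], v_range[1]):
--             hsv_tag.append(v_name)
--             break
--     return hsv_tag
-- ===== SOURCE B (Python) =====
-- H_BOUNDS = [0, 10, 20, 30, 40, 50, 60, 70, 80, 90, 100, 110, 120, 130, 140, 150, 160, 170, 180]
-- H_NAMES = ['H1', 'H2', 'H3', 'H4', 'H5', 'H6', 'H7', 'H8', 'H9', 'H10', 'H11', 'H12',
--            'H13', 'H14', 'H15', 'H16', 'H17', 'H18']
--
-- S_BOUNDS = [0, 15, 32, 45, 70, 91, 116, 128, 162, 188, 206, 230, 256]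
-- S_NAMES = ['S1', 'S2', 'S3', 'S4', 'S5', 'S6', 'S7', 'S8', 'S9', 'S10', 'S11', 'S12']
--
-- V_BOUNDS = [0, 25, 52, 75, 101, 131, 167, 206, 256]
-- V_NAMES = ['V1', 'V2', 'V3', 'V4', 'V5', 'V6', 'V7', 'V8']
--
--
-- def _bisect_right(a, x):
--     """Index of the first element of sorted list a strictly greater than x."""
--     lo, hi = 0, len(a)
--     while lo < hi:
--         mid = (lo + hi) // 2
--         if x < a[mid]:
--             hi = mid
--         else:
--             lo = mid + 1
--     return lo
--
--
-- def _chan_tag(bounds, names, x):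
--     # Buckets are contiguous: bounds[i-1] <= x < bounds[i] iff 0 < i < len(bounds).
--     i = _bisect_right(bounds, x)
--     if 0 < i < len(bounds):
--         return [names[i - 1]]
--     return []
--
--
-- def get_hsv_tag(h, s, v):
--     return (_chan_tag(H_BOUNDS, H_NAMES, h)
--             + _chan_tag(S_BOUNDS, S_NAMES, s)
--             + _chan_tag(V_BOUNDS, V_NAMES, v))
-- ===== Notes on version B (the rewrite author's own statement) =====
-- stated objective: idiomatic
-- what changed: B replaces A's three linear scans over the bucket dicts with per-channel sorted boundary/name lists looked up by a bisect_right binary search (hand-rolled while loop), appending names[i-1] when the found index lies strictly inside the boundaries.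
import Mathlib
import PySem

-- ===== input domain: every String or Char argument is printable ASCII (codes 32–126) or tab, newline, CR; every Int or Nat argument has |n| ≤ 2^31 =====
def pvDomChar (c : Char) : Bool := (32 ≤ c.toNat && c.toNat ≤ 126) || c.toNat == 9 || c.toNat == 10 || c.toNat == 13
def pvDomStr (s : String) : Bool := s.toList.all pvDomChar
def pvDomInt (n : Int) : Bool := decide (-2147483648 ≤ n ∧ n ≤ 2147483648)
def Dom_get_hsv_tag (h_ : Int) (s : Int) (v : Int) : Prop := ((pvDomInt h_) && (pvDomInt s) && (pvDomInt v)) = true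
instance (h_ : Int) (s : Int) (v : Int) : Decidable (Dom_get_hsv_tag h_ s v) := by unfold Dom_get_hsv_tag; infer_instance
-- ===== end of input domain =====

-- B replaces A's three linear scans over the bucket dicts with binary search on a
-- boundaries list per channel (idiomatic bisect_right; same exact results on ints).

-- ===== PORT A =====
-- A's bucket dicts as (name, (lo, hi)) association lists, in insertion order.
def hRangeA : List (String × Int × Int) :=
  [("H1",0,10),("H2",10,20),("H3",20,30),("H4",30,40),("H5",40,50),("H6",50,60),
   ("H7",60,70),("H8",70,80),("H9",80,90),("H10",90,100),("H11",100,110),("H12",110,120),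
   ("H13",120,130),("H14",130,140),("H15",140,150),("H16",150,160),("H17",160,170),
   ("H18",170,180)]

def sRangeA : List (String × Int × Int) :=
  [("S1",0,15),("S2",15,32),("S3",32,45),("S4",45,70),("S5",70,91),("S6",91,116),
   ("S7",116,128),("S8",128,162),("S9",162,188),("S10",188,206),("S11",206,230),
   ("S12",230,256)]

def vRangeA : List (String × Int × Int) :=
  [("V1",0,25),("V2",25,52),("V3",52,75),("V4",75,101),("V5",101,131),("V6",131,167),
   ("V7",167,206),("V8",206,256)]

-- A's 'for … if x in range(lo, hi): append; break' loop: first matching bucket name.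
-- 'x in range(lo, hi)' on an int x is exactly lo ≤ x < hi.
def scanTag (x : Int) : List (String × Int × Int) → List String
  | [] => []
  | (name, lo, hi) :: rest =>
      if lo ≤ x ∧ x < hi then [name] else scanTag x rest

def get_hsv_tag (h_ : Int) (s : Int) (v : Int) : List String :=
  scanTag h_ hRangeA ++ scanTag s sRangeA ++ scanTag v vRangeA

-- ===== PORT B =====
def H_BOUNDS : List Int := [0,10,20,30,40,50,60,70,80,90,100,110,120,130,140,150,160,170,180]
def H_NAMES : List String :=
  ["H1","H2","H3","H4","H5","H6","H7","H8","H9","H10","H11","H12","H13","H14","H15","H16","H17","H18"]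
def S_BOUNDS : List Int := [0,15,32,45,70,91,116,128,162,188,206,230,256]
def S_NAMES : List String := ["S1","S2","S3","S4","S5","S6","S7","S8","S9","S10","S11","S12"]
def V_BOUNDS : List Int := [0,25,52,75,101,131,167,206,256]
def V_NAMES : List String := ["V1","V2","V3","V4","V5","V6","V7","V8"]

-- Source B's while-loop of _bisect_right, run with fuel = len(a) (the loop halves
-- hi-lo ≤ len(a) each step, so len(a) iterations always suffice).
def bisectLoop (a : List Int) (x : Int) : Nat → Int → Int → Int
  | 0, lo, _ => lo
  | fuel+1, lo, hi =>
      if lo < hi then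
        let mid := PySem.Int.floordiv (lo + hi) 2
        -- a[mid] with 0 ≤ mid < len a on every reached iteration; getD 0 is never used
        if x < (PySem.List.pyGet? a mid).getD 0 then bisectLoop a x fuel lo mid
        else bisectLoop a x fuel (mid + 1) hi
      else lo

def bisectRight (a : List Int) (x : Int) : Int :=
  bisectLoop a x a.length 0 (a.length : Int)

def chanTag (bounds : List Int) (names : List String) (x : Int) : List String :=
  let i := bisectRight bounds x
  if 0 < i ∧ i < (bounds.length : Int) then
    [(PySem.List.pyGet? names (i - 1)).getD ""]
  else []

def get_hsv_tag_alt (h_ : Int) (s : Int) (v : Int) : List String :=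
  chanTag H_BOUNDS H_NAMES h_ ++ chanTag S_BOUNDS S_NAMES s ++ chanTag V_BOUNDS V_NAMES v

-- ===== PRECONDITION & SPEC =====
def Spec_get_hsv_tag (h_ : Int) (s : Int) (v : Int) (out : List String) : Prop := out = get_hsv_tag_alt h_ s v
instance (h_ : Int) (s : Int) (v : Int) (out : List String) : Decidable (Spec_get_hsv_tag h_ s v out) := by unfold Spec_get_hsv_tag; infer_instance

-- ===== CLAIM (what is proved, stated in full; the proofs are below) =====
def Claim_equal_get_hsv_tag : Prop := ∀ (h_ : Int) (s : Int) (v : Int), Dom_get_hsv_tag h_ s v → Spec_get_hsv_tag h_ s v (get_hsv_tag h_ s v)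
-- ===== LEMMAS AND PROOFS =====
theorem bisectLoop_spec (a : List Int) (x : Int)
    (hsort : ∀ i j : Nat, i ≤ j → j < a.length → a.getD i 0 ≤ a.getD j 0) :
    ∀ (fuel : Nat) (lo hi : Int), 0 ≤ lo → lo ≤ hi → hi ≤ (a.length : Int) →
    hi - lo ≤ (fuel : Int) →
    (∀ j : Nat, (j : Int) < lo → a.getD j 0 ≤ x) →
    (∀ j : Nat, hi ≤ (j : Int) → j < a.length → x < a.getD j 0) →
    (0 ≤ bisectLoop a x fuel lo hi ∧ bisectLoop a x fuel lo hi ≤ (a.length : Int)) ∧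
    (∀ j : Nat, (j : Int) < bisectLoop a x fuel lo hi → a.getD j 0 ≤ x) ∧
    (∀ j : Nat, bisectLoop a x fuel lo hi ≤ (j : Int) → j < a.length → x < a.getD j 0) := by
  intro fuel
  induction fuel with
  | zero =>
    intro lo hi h0 hlh hhl hf hlow hhigh
    have : lo = hi := by omega
    subst this
    simp only [bisectLoop]
    exact ⟨⟨h0, hhl⟩, hlow, fun j hj hj2 => hhigh j hj hj2⟩
  | succ f ih =>
    intro lo hi h0 hlh hhl hf hlow hhigh
    by_cases hcmp : lo < hi
    · have hmidb := PySem.Int.floordiv_two_mid_bounds (lo := lo) (hi := hi) hlh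
      set mid := PySem.Int.floordiv (lo + hi) 2 with hmiddef
      have hmidlt : mid < hi := by
        rw [hmiddef, PySem.Int.floordiv_lt_iff_lt_mul (by omega)]
        omega
      have hmid0 : 0 ≤ mid := by omega
      have hmidlen : mid < (a.length : Int) := by omega
      have hget : (PySem.List.pyGet? a mid).getD 0 = a.getD mid.toNat 0 := by
        rw [PySem.List.pyGet?_of_nonneg a hmid0, List.getD_eq_getElem?_getD]
      have hmidnat : (mid.toNat : Int) = mid := by omega
      have hmidnatlen : mid.toNat < a.length := by omega
      by_cases hx : x < (PySem.List.pyGet? a mid).getD 0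
      · have : bisectLoop a x (f+1) lo hi = bisectLoop a x f lo mid := by
          simp only [bisectLoop, if_pos hcmp, ← hmiddef, if_pos hx]
        rw [this]
        apply ih lo mid h0 (by omega) (by omega) (by omega) hlow
        intro j hj hjlen
        have : a.getD mid.toNat 0 ≤ a.getD j 0 := hsort mid.toNat j (by omega) hjlen
        rw [hget] at hx
        omega
      · have : bisectLoop a x (f+1) lo hi = bisectLoop a x f (mid+1) hi := by
          simp only [bisectLoop, if_pos hcmp, ← hmiddef, if_neg hx]
        rw [this]
        apply ih (mid+1) hi (by omega) (by omega) hhl (by omega) _ hhigh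
        intro j hj
        have hja : (j : Int) ≤ mid := by omega
        have : a.getD j 0 ≤ a.getD mid.toNat 0 := hsort j mid.toNat (by omega) hmidnatlen
        rw [hget] at hx
        omega
    · have : bisectLoop a x (f+1) lo hi = lo := by
        simp only [bisectLoop, if_neg hcmp]
      rw [this]
      have : lo = hi := by omega
      subst this
      exact ⟨⟨h0, hhl⟩, hlow, hhigh⟩

theorem bisectRight_all_gt (a : List Int) (x : Int)
    (hsort : ∀ i j : Nat, i ≤ j → j < a.length → a.getD i 0 ≤ a.getD j 0)
    (h : ∀ j : Nat, j < a.length → x < a.getD j 0) :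
    bisectRight a x = 0 := by
  unfold bisectRight
  obtain ⟨⟨h0, hlen⟩, hlow, _⟩ :=
    bisectLoop_spec a x hsort a.length 0 (a.length : Int) (by omega) (by omega) (by omega)
      (by omega) (by intro j hj; omega) (by intro j hj hjl; exact h j hjl)
  by_contra hne
  have hpos : 0 < bisectLoop a x a.length 0 (a.length : Int) := by omega
  have h1 := hlow 0 (by exact_mod_cast hpos)
  have hlenpos : 0 < a.length := by omega
  have h2 := h 0 hlenpos
  omega

theorem bisectRight_all_le (a : List Int) (x : Int)
    (hsort : ∀ i j : Nat, i ≤ j → j < a.length → a.getD i 0 ≤ a.getD j 0)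
    (h : ∀ j : Nat, j < a.length → a.getD j 0 ≤ x) :
    bisectRight a x = (a.length : Int) := by
  unfold bisectRight
  obtain ⟨⟨h0, hlen⟩, _, hhigh⟩ :=
    bisectLoop_spec a x hsort a.length 0 (a.length : Int) (by omega) (by omega) (by omega)
      (by omega) (by intro j hj; omega) (by intro j hj hjl; omega)
  by_contra hne
  set r := bisectLoop a x a.length 0 (a.length : Int) with hr
  have hrlt : r < (a.length : Int) := by omega
  have hrl : r.toNat < a.length := by omega
  have h1 := hhigh r.toNat (by omega) hrl
  have h2 := h r.toNat hrl
  omega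

theorem scanTag_nil (x : Int) (L : List (String × Int × Int))
    (h : ∀ e ∈ L, ¬(e.2.1 ≤ x ∧ x < e.2.2)) : scanTag x L = [] := by
  induction L with
  | nil => rfl
  | cons e t ih =>
    simp only [scanTag]
    rw [if_neg (h e (by simp))]
    exact ih (fun e' he' => h e' (by simp [he']))

set_option maxHeartbeats 2000000 in
set_option maxRecDepth 20000 in
theorem hAll : ((List.range 180).all
    (fun y => decide (scanTag (y : Int) hRangeA = chanTag H_BOUNDS H_NAMES (y : Int)))) = true := by
  decide

set_option maxHeartbeats 2000000 in
set_option maxRecDepth 20000 in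
theorem sAll : ((List.range 256).all
    (fun y => decide (scanTag (y : Int) sRangeA = chanTag S_BOUNDS S_NAMES (y : Int)))) = true := by
  decide

set_option maxHeartbeats 2000000 in
set_option maxRecDepth 20000 in
theorem vAll : ((List.range 256).all
    (fun y => decide (scanTag (y : Int) vRangeA = chanTag V_BOUNDS V_NAMES (y : Int)))) = true := by
  decide

theorem hChan (x : Int) : scanTag x hRangeA = chanTag H_BOUNDS H_NAMES x := by
  by_cases hr : 0 ≤ x ∧ x < 180
  · have hall := List.all_eq_true.1 hAll x.toNat (List.mem_range.2 (by omega))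
    have hx : ((x.toNat : Nat) : Int) = x := by omega
    rw [hx] at hall
    exact of_decide_eq_true hall
  · have hp : List.Pairwise (· ≤ ·) H_BOUNDS := by decide
    have hs : ∀ i j : Nat, i ≤ j → j < H_BOUNDS.length → H_BOUNDS.getD i 0 ≤ H_BOUNDS.getD j 0 := by
      intro i j hij hj
      rw [List.getD_eq_getElem _ _ (lt_of_le_of_lt hij hj), List.getD_eq_getElem _ _ hj]
      rcases lt_or_eq_of_le hij with hlt | heq
      · exact List.pairwise_iff_getElem.1 hp i j (lt_of_le_of_lt hij hj) hj hlt
      · subst heq; exact le_refl _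
    have hscan : scanTag x hRangeA = [] := by
      apply scanTag_nil
      intro e he
      fin_cases he <;> (simp only [] ; omega)
    rcases (by omega : x < 0 ∨ 180 ≤ x) with h | h
    · have hb : bisectRight H_BOUNDS x = 0 := by
        apply bisectRight_all_gt _ _ hs
        intro j hj
        have hj' : j < 19 := by simpa [H_BOUNDS] using hj
        interval_cases j <;> simp [H_BOUNDS] <;> omega
      rw [hscan]
      simp [chanTag, hb]
    · have hb : bisectRight H_BOUNDS x = 19 := by
        have hall : ∀ j : Nat, j < H_BOUNDS.length → H_BOUNDS.getD j 0 ≤ x := by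
          intro j hj
          have hj' : j < 19 := by simpa [H_BOUNDS] using hj
          interval_cases j <;> simp [H_BOUNDS] <;> omega
        have := bisectRight_all_le H_BOUNDS x hs hall
        simpa [H_BOUNDS] using this
      rw [hscan]
      unfold chanTag
      rw [hb]
      norm_num [H_BOUNDS]

theorem sChan (x : Int) : scanTag x sRangeA = chanTag S_BOUNDS S_NAMES x := by
  by_cases hr : 0 ≤ x ∧ x < 256
  · have hall := List.all_eq_true.1 sAll x.toNat (List.mem_range.2 (by omega))
    have hx : ((x.toNat : Nat) : Int) = x := by omega
    rw [hx] at hall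
    exact of_decide_eq_true hall
  · have hp : List.Pairwise (· ≤ ·) S_BOUNDS := by decide
    have hs : ∀ i j : Nat, i ≤ j → j < S_BOUNDS.length → S_BOUNDS.getD i 0 ≤ S_BOUNDS.getD j 0 := by
      intro i j hij hj
      rw [List.getD_eq_getElem _ _ (lt_of_le_of_lt hij hj), List.getD_eq_getElem _ _ hj]
      rcases lt_or_eq_of_le hij with hlt | heq
      · exact List.pairwise_iff_getElem.1 hp i j (lt_of_le_of_lt hij hj) hj hlt
      · subst heq; exact le_refl _
    have hscan : scanTag x sRangeA = [] := by
      apply scanTag_nil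
      intro e he
      fin_cases he <;> (simp only [] ; omega)
    rcases (by omega : x < 0 ∨ 256 ≤ x) with h | h
    · have hb : bisectRight S_BOUNDS x = 0 := by
        apply bisectRight_all_gt _ _ hs
        intro j hj
        have hj' : j < 13 := by simpa [S_BOUNDS] using hj
        interval_cases j <;> simp [S_BOUNDS] <;> omega
      rw [hscan]
      simp [chanTag, hb]
    · have hb : bisectRight S_BOUNDS x = 13 := by
        have hall : ∀ j : Nat, j < S_BOUNDS.length → S_BOUNDS.getD j 0 ≤ x := by
          intro j hj
          have hj' : j < 13 := by simpa [S_BOUNDS] using hj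
          interval_cases j <;> simp [S_BOUNDS] <;> omega
        have := bisectRight_all_le S_BOUNDS x hs hall
        simpa [S_BOUNDS] using this
      rw [hscan]
      unfold chanTag
      rw [hb]
      norm_num [S_BOUNDS]

theorem vChan (x : Int) : scanTag x vRangeA = chanTag V_BOUNDS V_NAMES x := by
  by_cases hr : 0 ≤ x ∧ x < 256
  · have hall := List.all_eq_true.1 vAll x.toNat (List.mem_range.2 (by omega))
    have hx : ((x.toNat : Nat) : Int) = x := by omega
    rw [hx] at hall
    exact of_decide_eq_true hall
  · have hp : List.Pairwise (· ≤ ·) V_BOUNDS := by decide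
    have hs : ∀ i j : Nat, i ≤ j → j < V_BOUNDS.length → V_BOUNDS.getD i 0 ≤ V_BOUNDS.getD j 0 := by
      intro i j hij hj
      rw [List.getD_eq_getElem _ _ (lt_of_le_of_lt hij hj), List.getD_eq_getElem _ _ hj]
      rcases lt_or_eq_of_le hij with hlt | heq
      · exact List.pairwise_iff_getElem.1 hp i j (lt_of_le_of_lt hij hj) hj hlt
      · subst heq; exact le_refl _
    have hscan : scanTag x vRangeA = [] := by
      apply scanTag_nil
      intro e he
      fin_cases he <;> (simp only [] ; omega)
    rcases (by omega : x < 0 ∨ 256 ≤ x) with h | h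
    · have hb : bisectRight V_BOUNDS x = 0 := by
        apply bisectRight_all_gt _ _ hs
        intro j hj
        have hj' : j < 9 := by simpa [V_BOUNDS] using hj
        interval_cases j <;> simp [V_BOUNDS] <;> omega
      rw [hscan]
      simp [chanTag, hb]
    · have hb : bisectRight V_BOUNDS x = 9 := by
        have hall : ∀ j : Nat, j < V_BOUNDS.length → V_BOUNDS.getD j 0 ≤ x := by
          intro j hj
          have hj' : j < 9 := by simpa [V_BOUNDS] using hj
          interval_cases j <;> simp [V_BOUNDS] <;> omega
        have := bisectRight_all_le V_BOUNDS x hs hall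
        simpa [V_BOUNDS] using this
      rw [hscan]
      unfold chanTag
      rw [hb]
      norm_num [V_BOUNDS]

-- ===== VERDICT (by name: the statement is the Claim_ definition above) =====
theorem get_hsv_tag_spec : Claim_equal_get_hsv_tag := by
  intro h_ s v _
  unfold Spec_get_hsv_tag get_hsv_tag get_hsv_tag_alt
  rw [hChan, sChan, vChan]
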